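-- pv_equiv track=rewrite | github.com/JimWasHere/UD_Cohort_problem_set | practice_problems/no_consecutive_letters.py | no_consecutive_letters
-- ===== SOURCE A (Python) =====
-- def no_consecutive_letters(words):
--     lst = set()
--     for word in words:
--         for x in word:
--             if x not in lst and x + x in word:
--                 lst.add(x)
--     result = []
--     for x in "ABCDEFGHIJKLMNOPQRSTUVWXYZ":
--         if x not in lst:
--             result.append(x)
--     return result
-- ===== SOURCE B (Python) =====
-- def no_consecutive_letters(words):
--     return [c for c in "ABCDEFGHIJKLMNOPQRSTUVWXYZ"
--             if not any(c + c in word for word in words)]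
-- ===== Notes on version B (the rewrite author's own statement) =====
-- stated objective: simpler
-- what changed: A scans every word building a set of all doubled characters and then filters the alphabet against it; B drops that intermediate set and, for each of the 26 uppercase letters, directly checks whether any word contains the doubled substring.
import Mathlib
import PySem

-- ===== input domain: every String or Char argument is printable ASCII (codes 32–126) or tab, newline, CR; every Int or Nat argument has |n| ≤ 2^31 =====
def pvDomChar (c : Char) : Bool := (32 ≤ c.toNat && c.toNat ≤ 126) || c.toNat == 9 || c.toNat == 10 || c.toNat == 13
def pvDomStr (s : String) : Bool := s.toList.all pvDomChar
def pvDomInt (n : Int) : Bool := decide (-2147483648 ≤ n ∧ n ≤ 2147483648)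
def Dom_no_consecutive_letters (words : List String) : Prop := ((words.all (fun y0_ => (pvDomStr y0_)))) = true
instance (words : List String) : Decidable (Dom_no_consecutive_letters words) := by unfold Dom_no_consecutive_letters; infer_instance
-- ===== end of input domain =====

-- B drops A's intermediate doubled-letter set and instead tests each alphabet letter directly against the words (simpler decomposition, same cost).

-- ===== PORT A =====
def no_consecutive_letters (words : List String) : List String :=
  let lst : PySem.Set Char :=
    words.foldl (fun lst word =>
      word.toList.foldl (fun lst x =>
        if !(PySem.Set.contains lst x) && PySem.Str.isIn (String.ofList [x, x]) word then
          PySem.Set.add lst x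
        else lst) lst) PySem.Set.empty
  "ABCDEFGHIJKLMNOPQRSTUVWXYZ".toList.foldl (fun result x =>
    if !(PySem.Set.contains lst x) then result ++ [String.ofList [x]] else result) []

-- ===== PORT B =====
def no_consecutive_letters_alt (words : List String) : List String :=
  ("ABCDEFGHIJKLMNOPQRSTUVWXYZ".toList.filter
    (fun c => !(words.any (fun word => PySem.Str.isIn (String.ofList [c, c]) word)))).map
    (fun c => String.ofList [c])

-- ===== PRECONDITION & SPEC =====
def Spec_no_consecutive_letters (words : List String) (out : List String) : Prop := out = no_consecutive_letters_alt words
instance (words : List String) (out : List String) : Decidable (Spec_no_consecutive_letters words out) := by unfold Spec_no_consecutive_letters; infer_instance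

-- ===== CLAIM (what is proved, stated in full; the proofs are below) =====
def Claim_equal_no_consecutive_letters : Prop := ∀ (words : List String), Dom_no_consecutive_letters words → Spec_no_consecutive_letters words (no_consecutive_letters words)

-- ===== LEMMAS AND PROOFS =====

-- membership after A's inner loop over one word
theorem pv_inner_mem (word : String) (l : List Char) (s : PySem.Set Char) (x : Char) :
    (x ∈ l.foldl (fun lst c =>
        if !(PySem.Set.contains lst c) && PySem.Str.isIn (String.ofList [c, c]) word then
          PySem.Set.add lst c
        else lst) s
      ↔ x ∈ s ∨ (x ∈ l ∧ PySem.Str.isIn (String.ofList [x, x]) word = true)) := by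
  induction l generalizing s with
  | nil => simp
  | cons c t ih =>
    have hstep : ∀ y : Char,
        (y ∈ (if !(PySem.Set.contains s c) && PySem.Str.isIn (String.ofList [c, c]) word then
                PySem.Set.add s c else s)
          ↔ y ∈ s ∨ (y = c ∧ PySem.Str.isIn (String.ofList [c, c]) word = true)) := by
      intro y
      by_cases hin : PySem.Str.isIn (String.ofList [c, c]) word = true
      · have hin' : PySem.Chars.isIn [c, c] word.toList = true := by simpa using hin
        by_cases hc : c ∈ s
        · have hcb : PySem.Set.contains s c = true := (PySem.Set.contains_iff s c).mpr hc
          simp only [hcb, Bool.not_true, Bool.false_and]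
          
          constructor
          · exact Or.inl
          · rintro (h | ⟨rfl, _⟩)
            · exact h
            · exact hc
        · have hcb : PySem.Set.contains s c = false := by
            rw [Bool.eq_false_iff]
            exact fun hb => hc ((PySem.Set.contains_iff s c).mp hb)
          simp [hin']
          rw [if_neg hc]
          exact PySem.Set.mem_add s c y
      · have hin' : PySem.Chars.isIn [c, c] word.toList = false := by
          rw [Bool.eq_false_iff]
          exact fun hb => hin (by simpa using hb)
        simp [hin']
    simp only [List.foldl_cons]
    rw [ih, hstep x]
    by_cases hx : x = c
    · subst hx; simp
      tauto
    · simp [hx]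

-- membership after A's outer loop
theorem pv_outer_mem (ws : List String) (s : PySem.Set Char) (x : Char) :
    (x ∈ ws.foldl (fun lst word =>
        word.toList.foldl (fun lst c =>
          if !(PySem.Set.contains lst c) && PySem.Str.isIn (String.ofList [c, c]) word then
            PySem.Set.add lst c
          else lst) lst) s
      ↔ x ∈ s ∨ ∃ w ∈ ws, PySem.Str.isIn (String.ofList [x, x]) w = true) := by
  induction ws generalizing s with
  | nil => simp
  | cons w t ih =>
    simp only [List.foldl_cons]
    rw [ih, pv_inner_mem]
    constructor
    · rintro ((h | ⟨_, h2⟩) | ⟨v, hv, h⟩)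
      · exact Or.inl h
      · exact Or.inr ⟨w, by simp, h2⟩
      · exact Or.inr ⟨v, by simp [hv], h⟩
    · rintro (h | ⟨v, hv, h⟩)
      · exact Or.inl (Or.inl h)
      · rcases List.mem_cons.mp hv with rfl | hv
        · refine Or.inl (Or.inr ⟨?_, h⟩)
          have hinf : [x, x] <:+: v.toList := by
            have h2 := (PySem.Str.isIn_iff_infix (String.ofList [x, x]) v).mp h
            simpa using h2
          exact hinf.mem (by simp)
        · exact Or.inr ⟨v, hv, h⟩

-- ===== VERDICT (by name: the statement is the Claim_ definition above) =====
theorem no_consecutive_letters_spec : Claim_equal_no_consecutive_letters := by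
  intro words _
  unfold Spec_no_consecutive_letters no_consecutive_letters no_consecutive_letters_alt
  rw [PySem.List.foldl_append_if
        (fun x => !(PySem.Set.contains
          (words.foldl (fun lst word =>
            word.toList.foldl (fun lst c =>
              if !(PySem.Set.contains lst c) && PySem.Str.isIn (String.ofList [c, c]) word then
                PySem.Set.add lst c
              else lst) lst) PySem.Set.empty) x))
        (fun x => String.ofList [x])]
  simp only [List.nil_append]
  congr 1
  apply List.filter_congr
  intro c _
  have h := pv_outer_mem words PySem.Set.empty c
  by_cases hc : ∃ w ∈ words, PySem.Str.isIn (String.ofList [c, c]) w = true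
  · have h1 : PySem.Set.contains
        (words.foldl (fun lst word =>
            word.toList.foldl (fun lst c =>
              if !(PySem.Set.contains lst c) && PySem.Str.isIn (String.ofList [c, c]) word then
                PySem.Set.add lst c
              else lst) lst) PySem.Set.empty) c = true :=
      (PySem.Set.contains_iff _ _).mpr (h.mpr (Or.inr hc))
    obtain ⟨w, hw, hin⟩ := hc
    have hany : words.any (fun word => PySem.Str.isIn (String.ofList [c, c]) word) = true :=
      List.any_eq_true.mpr ⟨w, hw, hin⟩
    simp only [h1, hany]
  · have hmem : c ∉ words.foldl (fun lst word =>
            word.toList.foldl (fun lst c =>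
              if !(PySem.Set.contains lst c) && PySem.Str.isIn (String.ofList [c, c]) word then
                PySem.Set.add lst c
              else lst) lst) PySem.Set.empty := by
      intro hm
      rcases h.mp hm with h0 | h0
      · simp [PySem.Set.empty] at h0
      · exact hc h0
    have h1 : PySem.Set.contains
        (words.foldl (fun lst word =>
            word.toList.foldl (fun lst c =>
              if !(PySem.Set.contains lst c) && PySem.Str.isIn (String.ofList [c, c]) word then
                PySem.Set.add lst c
              else lst) lst) PySem.Set.empty) c = false := by
      rw [Bool.eq_false_iff]
      exact fun hb => hmem ((PySem.Set.contains_iff _ _).mp hb)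
    have hany : words.any (fun word => PySem.Str.isIn (String.ofList [c, c]) word) = false :=
      List.any_eq_false.mpr (fun w hw hb => hc ⟨w, hw, hb⟩)
    simp only [h1, hany]
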